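-- pv_equiv track=rewrite | github.com/anerecye/New-project | src/run_hgdp_population_analysis.py | normalize_variant
-- ===== SOURCE A (Python) =====
-- def normalize_variant(pos: int, ref: str, alt: str) -> tuple[int, str, str]:
--     """Left-trim and right-trim shared bases (bcftools norm approximation)."""
--     pos, ref, alt = int(pos), str(ref).upper(), str(alt).upper()
--     while len(ref) > 1 and len(alt) > 1 and ref[-1] == alt[-1]:
--         ref = ref[:-1]
--         alt = alt[:-1]
--     while len(ref) > 1 and len(alt) > 1 and ref[0] == alt[0]:
--         ref = ref[1:]
--         alt = alt[1:]
--         pos += 1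
--     return pos, ref, alt
-- ===== SOURCE B (Python) =====
-- def normalize_variant(pos: int, ref: str, alt: str) -> tuple[int, str, str]:
--     """Two-pointer index counting, then one slice per allele (O(n))."""
--     pos, r, a = int(pos), str(ref).upper(), str(alt).upper()
--     n, m = len(r), len(a)
--     k = 0
--     lim = min(n, m) - 1
--     while k < lim and r[n - 1 - k] == a[m - 1 - k]:
--         k += 1
--     l = 0
--     lim2 = min(n, m) - k - 1
--     while l < lim2 and r[l] == a[l]:
--         l += 1
--     return pos + l, r[l:n - k], a[l:m - k]
-- ===== Notes on version B (the rewrite author's own statement) =====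
-- stated objective: faster
-- what changed: Replaces A's repeated string re-slicing loops (each ref[:-1]/ref[1:] copies the string) with two index-counting scans and a single slice per allele.
import Mathlib
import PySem

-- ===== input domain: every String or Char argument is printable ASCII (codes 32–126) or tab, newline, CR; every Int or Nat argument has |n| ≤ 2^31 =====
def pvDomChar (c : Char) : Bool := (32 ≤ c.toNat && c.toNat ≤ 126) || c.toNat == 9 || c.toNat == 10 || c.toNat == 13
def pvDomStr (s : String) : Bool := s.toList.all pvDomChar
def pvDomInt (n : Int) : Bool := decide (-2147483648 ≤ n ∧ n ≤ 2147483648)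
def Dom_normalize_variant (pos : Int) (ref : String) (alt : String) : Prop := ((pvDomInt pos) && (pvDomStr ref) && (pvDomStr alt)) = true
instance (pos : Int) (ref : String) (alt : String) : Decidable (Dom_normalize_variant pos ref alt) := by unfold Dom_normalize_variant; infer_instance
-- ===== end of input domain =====

-- B replaces A's repeated whole-string re-slicing loops by two index-counting scans and one slice
-- per allele (a timing run measures the speed-up). Return value only; no argument is mutated.

-- ===== PORT A =====
-- while len(ref) > 1 and len(alt) > 1 and ref[-1] == alt[-1]: ref = ref[:-1]; alt = alt[:-1]
-- (ref[-1] on a nonempty string = getLast?; ref[:-1] = dropLast — exact here since length > 1)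
def pvTrimR (r a : List Char) : List Char × List Char :=
  if 1 < r.length ∧ 1 < a.length ∧ r.getLast? = a.getLast? then
    pvTrimR r.dropLast a.dropLast
  else (r, a)
termination_by r.length
decreasing_by simp [List.length_dropLast]; omega

-- while len(ref) > 1 and len(alt) > 1 and ref[0] == alt[0]: ref = ref[1:]; alt = alt[1:]; pos += 1
-- (ref[0] on a nonempty string = head?; ref[1:] = drop 1 — exact here since length > 1)
def pvTrimL (pos : Int) (r a : List Char) : Int × List Char × List Char :=
  if 1 < r.length ∧ 1 < a.length ∧ r.head? = a.head? then
    pvTrimL (pos + 1) (r.drop 1) (a.drop 1)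
  else (pos, r, a)
termination_by r.length
decreasing_by simp; omega

def normalize_variant (pos : Int) (ref : String) (alt : String) : Int × String × String :=
  let r := (PySem.Str.upper ref).toList
  let a := (PySem.Str.upper alt).toList
  let ra := pvTrimR r a
  let pra := pvTrimL pos ra.1 ra.2
  (pra.1, String.mk pra.2.1, String.mk pra.2.2)

-- ===== PORT B =====
-- while k < lim and r[n-1-k] == a[m-1-k]: k += 1   (indices are in range when k < lim, so
-- Python's r[n-1-k] is getElem? at the Nat index n-1-k; comparing the Options is exact)
def pvCountR (r a : List Char) (n m lim k : Nat) : Nat :=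
  if k < lim ∧ r[n - 1 - k]? = a[m - 1 - k]? then pvCountR r a n m lim (k + 1) else k
termination_by lim - k
decreasing_by omega

-- while l < lim2 and r[l] == a[l]: l += 1
def pvCountL (r a : List Char) (lim2 l : Nat) : Nat :=
  if l < lim2 ∧ r[l]? = a[l]? then pvCountL r a lim2 (l + 1) else l
termination_by lim2 - l
decreasing_by omega

def normalize_variant_alt (pos : Int) (ref : String) (alt : String) : Int × String × String :=
  let r := (PySem.Str.upper ref).toList
  let a := (PySem.Str.upper alt).toList
  let n := r.length
  let m := a.length
  let k := pvCountR r a n m (min n m - 1) 0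
  let l := pvCountL r a (min n m - k - 1) 0
  -- r[l : n-k] with 0 ≤ l ≤ n-k ≤ n is exactly take (n-k-l) (drop l r)
  (pos + l, String.mk ((r.drop l).take (n - k - l)), String.mk ((a.drop l).take (m - k - l)))

-- ===== PRECONDITION & SPEC =====
def Spec_normalize_variant (pos : Int) (ref : String) (alt : String) (out : Int × String × String) : Prop := out = normalize_variant_alt pos ref alt
instance (pos : Int) (ref : String) (alt : String) (out : Int × String × String) : Decidable (Spec_normalize_variant pos ref alt out) := by unfold Spec_normalize_variant; infer_instance

-- ===== CLAIM (what is proved, stated in full; the proofs are below) =====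
def Claim_equal_normalize_variant : Prop := ∀ (pos : Int) (ref : String) (alt : String), Dom_normalize_variant pos ref alt → Spec_normalize_variant pos ref alt (normalize_variant pos ref alt)

-- ===== LEMMAS AND PROOFS =====

lemma take_dropLast (l : List Char) (n : Nat) (h : n ≤ l.length) :
    (l.take n).dropLast = l.take (n - 1) := by
  rw [List.dropLast_eq_take, List.take_take, List.length_take]
  congr 1; omega

lemma trimR_eq (R A : List Char) (k : Nat) :
    pvTrimR (R.take (R.length - k)) (A.take (A.length - k)) =
      (R.take (R.length - pvCountR R A R.length A.length (min R.length A.length - 1) k),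
       A.take (A.length - pvCountR R A R.length A.length (min R.length A.length - 1) k)) := by
  fun_induction pvCountR R A R.length A.length (min R.length A.length - 1) k with
  | case1 k hc ih =>
    obtain ⟨hk, heq⟩ := hc
    rw [pvTrimR]
    rw [if_pos, take_dropLast R _ (by omega), take_dropLast A _ (by omega),
        show R.length - k - 1 = R.length - (k + 1) by omega,
        show A.length - k - 1 = A.length - (k + 1) by omega]
    · exact ih
    · refine ⟨by simp; omega, by simp; omega, ?_⟩
      rw [List.getLast?_eq_getElem?, List.getLast?_eq_getElem?]
      simp only [List.length_take]
      rw [List.getElem?_take_of_lt (by omega), List.getElem?_take_of_lt (by omega)]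
      rw [show min (R.length - k) R.length - 1 = R.length - 1 - k by omega,
          show min (A.length - k) A.length - 1 = A.length - 1 - k by omega]
      exact heq
  | case2 k hc =>
    rw [pvTrimR, if_neg]
    intro ⟨h1, h2, h3⟩
    simp only [List.length_take] at h1 h2
    rw [List.getLast?_eq_getElem?, List.getLast?_eq_getElem?] at h3
    simp only [List.length_take] at h3
    rw [List.getElem?_take_of_lt (by omega), List.getElem?_take_of_lt (by omega)] at h3
    exact hc ⟨by omega, by
      rw [show R.length - 1 - k = min (R.length - k) R.length - 1 by omega,
          show A.length - 1 - k = min (A.length - k) A.length - 1 by omega]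
      exact h3⟩

lemma trimL_eq (R A : List Char) (k : Nat) (pos : Int) (l : Nat) :
    pvTrimL (pos + l) ((R.take (R.length - k)).drop l) ((A.take (A.length - k)).drop l) =
      (pos + (pvCountL R A (min R.length A.length - k - 1) l : Nat),
       (R.take (R.length - k)).drop (pvCountL R A (min R.length A.length - k - 1) l),
       (A.take (A.length - k)).drop (pvCountL R A (min R.length A.length - k - 1) l)) := by
  fun_induction pvCountL R A (min R.length A.length - k - 1) l with
  | case1 l hc ih =>
    obtain ⟨hl, heq⟩ := hc
    rw [pvTrimL]
    rw [if_pos, List.drop_drop, List.drop_drop,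
        show pos + (l : Int) + 1 = pos + ((l + 1 : Nat) : Int) by push_cast; ring]
    · exact ih
    · refine ⟨by simp; omega, by simp; omega, ?_⟩
      rw [List.head?_eq_getElem?, List.head?_eq_getElem?, List.getElem?_drop, List.getElem?_drop]
      rw [List.getElem?_take_of_lt (by omega), List.getElem?_take_of_lt (by omega)]
      simpa using heq
  | case2 l hc =>
    rw [pvTrimL, if_neg]
    intro ⟨h1, h2, h3⟩
    simp only [List.length_drop, List.length_take] at h1 h2
    rw [List.head?_eq_getElem?, List.head?_eq_getElem?, List.getElem?_drop, List.getElem?_drop] at h3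
    rw [List.getElem?_take_of_lt (by omega), List.getElem?_take_of_lt (by omega)] at h3
    simp only [Nat.add_zero] at h3
    exact hc ⟨by omega, h3⟩

-- ===== VERDICT (by name: the statement is the Claim_ definition above) =====
theorem normalize_variant_spec : Claim_equal_normalize_variant := by
  intro pos ref alt _
  unfold Spec_normalize_variant normalize_variant normalize_variant_alt
  set R := (PySem.Str.upper ref).toList with hRdef
  set A := (PySem.Str.upper alt).toList with hAdef
  have hR := trimR_eq R A 0
  simp only [Nat.sub_zero, List.take_length] at hR
  set k := pvCountR R A R.length A.length (min R.length A.length - 1) 0 with hk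
  have hL := trimL_eq R A k pos 0
  simp only [List.drop_zero, Nat.cast_zero, add_zero] at hL
  simp only [hR, hL, List.drop_take]
  rw [← hk]
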